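-- pv_equiv track=rewrite | github.com/Nerxion/ki-anwendung | answer_processing/score_sentences.py | get_score_documents
-- ===== SOURCE A (Python) =====
-- def get_score(sentence, words, keywords):
--     ''' counts how often any words from the question appear in a sentence and returns that as the score '''
--     amount = 0
--     for word in words:
--         if word in sentence:
--             if word in keywords: # Woerter gewichten
--                 amount += (sentence.count(word) * 2)
--             else:
--                 amount += sentence.count(word)
--     return amount
--
-- def get_score_documents(sentences, words, keywords):
--     ''' run through all sentences in all documents and scores them '''
--     docu_dict = {}
--     for sentence in sentences:
--         score = get_score(sentence, words, keywords)
--         if score in docu_dict: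
--             docu_dict[score].append(sentence)
--         else:
--             docu_dict[score] = [sentence]
--     return docu_dict
-- ===== SOURCE B (Python) =====
-- def get_score_documents(sentences, words, keywords):
--     ''' score sentences by weighted word counts, bucket by score (dict score -> sentences) '''
--     # weight table built once: each occurrence of a word in `words` contributes 2 if it
--     # is a keyword else 1, so the total weight of a distinct word is weight * multiplicity
--     kw = set(keywords)
--     weights = {}
--     for w in words:
--         weights[w] = weights.get(w, 0) + (2 if w in kw else 1)
--     items = list(weights.items())
--     scored = [(sum(wt * s.count(w) for w, wt in items if w in s), s) for s in sentences]
--     order = list(dict.fromkeys(sc for sc, _ in scored))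
--     return {sc: [s for c, s in scored if c == sc] for sc in order}
-- ===== Notes on version B (the rewrite author's own statement) =====
-- stated objective: faster
-- what changed: B builds a keyword set and a per-distinct-word weight table once (weight = multiplicity x 1-or-2), scores each sentence by a single sum over the distinct words, and groups sentences by score via dedup of the score list plus filtering, instead of A's per-sentence scan over every word occurrence with an inner keyword-list scan and incremental dict bucketing.
import Mathlib
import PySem

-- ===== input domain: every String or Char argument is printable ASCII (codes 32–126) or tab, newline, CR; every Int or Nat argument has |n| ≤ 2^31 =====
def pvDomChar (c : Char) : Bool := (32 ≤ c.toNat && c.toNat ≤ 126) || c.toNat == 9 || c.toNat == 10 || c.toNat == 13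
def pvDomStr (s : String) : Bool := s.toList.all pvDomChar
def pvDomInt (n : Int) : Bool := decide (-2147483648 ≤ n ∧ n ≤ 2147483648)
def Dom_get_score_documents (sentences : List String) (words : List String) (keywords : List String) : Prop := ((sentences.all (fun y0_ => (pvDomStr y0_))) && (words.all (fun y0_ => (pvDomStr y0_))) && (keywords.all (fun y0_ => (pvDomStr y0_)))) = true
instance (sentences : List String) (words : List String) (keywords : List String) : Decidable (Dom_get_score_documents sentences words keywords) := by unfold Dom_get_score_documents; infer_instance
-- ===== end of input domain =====

-- B precomputes a keyword set and a per-distinct-word weight table once, scores each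
-- sentence over the distinct words only, and groups by score via dedup + filter
-- (objective: faster — removes the per-sentence keyword scan and duplicate-word rescans; measured faster in a timing run).

-- ===== PORT A =====
-- helper: Python get_score
def pvA_get_score (sentence : String) (words : List String) (keywords : List String) : Int :=
  words.foldl (fun amount word =>
    if PySem.Str.isIn word sentence then
      if keywords.contains word then
        amount + (PySem.Str.count sentence word : Int) * 2
      else
        amount + (PySem.Str.count sentence word : Int)
    else amount) 0

def get_score_documents (sentences : List String) (words : List String) (keywords : List String) : List (Int × List String) :=
  (sentences.foldl (fun d sentence =>
    let score := pvA_get_score sentence words keywords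
    if d.contains score then d.modify score [] (fun xs => xs ++ [sentence])
    else d.insert score [sentence]) PySem.Dict.empty).items

-- ===== PORT B =====
-- weight table: weights[w] = weights.get(w, 0) + (2 if w in kw else 1), kw = set(keywords)
def pvB_weights (words : List String) (keywords : List String) : PySem.Dict String Int :=
  let kw : PySem.Set String := PySem.Set.ofList keywords
  words.foldl (fun d w => d.insert w (d.getD w 0 + (if kw.contains w then 2 else 1))) PySem.Dict.empty

-- sum(wt * s.count(w) for w, wt in items if w in s)
def pvB_score (items : List (String × Int)) (s : String) : Int :=
  ((items.filter (fun p => PySem.Str.isIn p.1 s)).map (fun p => p.2 * (PySem.Str.count s p.1 : Int))).sum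

def get_score_documents_alt (sentences : List String) (words : List String) (keywords : List String) : List (Int × List String) :=
  let items := (pvB_weights words keywords).items
  let scored := sentences.map (fun s => (pvB_score items s, s))
  let order := PySem.List.dedup (scored.map (fun p => p.1))
  -- the final dict comprehension iterates the DISTINCT scores `order` in first-occurrence
  -- order, so its item list is exactly this map (keys are distinct by construction)
  order.map (fun sc => (sc, (scored.filter (fun p => p.1 == sc)).map (fun p => p.2)))

-- ===== PRECONDITION & SPEC =====
def Spec_get_score_documents (sentences : List String) (words : List String) (keywords : List String) (out : List (Int × List String)) : Prop := out = get_score_documents_alt sentences words keywords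
instance (sentences : List String) (words : List String) (keywords : List String) (out : List (Int × List String)) : Decidable (Spec_get_score_documents sentences words keywords out) := by unfold Spec_get_score_documents; infer_instance

-- ===== CLAIM (what is proved, stated in full; the proofs are below) =====
def Claim_equal_get_score_documents : Prop := ∀ (sentences : List String) (words : List String) (keywords : List String), Dom_get_score_documents sentences words keywords → Spec_get_score_documents sentences words keywords (get_score_documents sentences words keywords)

-- ===== LEMMAS AND PROOFS =====

-- the weight of one occurrence of w
def pvWt (keywords : List String) (w : String) : Int := if keywords.contains w then 2 else 1

lemma pv_contains_ofList (ks : List String) (w : String) :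
    (PySem.Set.ofList ks).contains w = ks.contains w := by
  by_cases h : w ∈ ks <;>
    simp [List.contains_eq_mem, PySem.Set.mem_ofList, h]

lemma pv_weights_getD (g : String → Int) (ws : List String) (d : PySem.Dict String Int) (v : String) :
    (ws.foldl (fun d w => d.insert w (d.getD w 0 + g w)) d).getD v 0
      = d.getD v 0 + g v * (ws.count v : Int) := by
  induction ws generalizing d with
  | nil => simp
  | cons w ws ih =>
      rw [List.foldl_cons, ih]
      by_cases hv : v = w
      · subst hv
        rw [PySem.Dict.getD_insert_self, List.count_cons_self]
        push_cast; ring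
      · rw [PySem.Dict.getD_insert_of_ne _ _ _ hv, List.count_cons_of_ne (Ne.symm hv)]

-- items of a dict with nodup keys, as a map over its keys
lemma pv_items_eq_keys_map {κ ν : Type} [BEq κ] [LawfulBEq κ] (d : PySem.Dict κ ν) (d0 : ν)
    (h : d.keys.Nodup) : d.items = d.keys.map (fun k => (k, d.getD k d0)) := by
  unfold PySem.Dict.keys
  rw [List.map_map]
  conv_lhs => rw [← List.map_id d.items]
  apply List.map_congr_left
  intro p hp
  have := PySem.Dict.getD_of_mem_items d (k := p.1) (v := p.2) (by simpa using hp) h d0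
  simp [Function.comp, this]

lemma pv_filter_map_sum {α : Type} (l : List α) (p : α → Bool) (f : α → Int) :
    ((l.filter p).map f).sum = (l.map (fun x => if p x then f x else 0)).sum := by
  induction l with
  | nil => rfl
  | cons x xs ih => by_cases h : p x <;> simp [h, ih]

-- sum over a list = sum over its distinct elements weighted by multiplicity
lemma pv_sum_dedup (l : List String) (h : String → Int) :
    (l.map h).sum = ((PySem.Set.ofList l).map (fun w => (l.count w : Int) * h w)).sum := by
  rw [Finset.sum_list_map_count, ← List.sum_toFinset _ (PySem.Set.nodup_ofList l)]
  have hfs : (PySem.Set.ofList l).toFinset = l.toFinset := by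
    ext x; simp [PySem.Set.mem_ofList]
  rw [hfs]
  apply Finset.sum_congr rfl
  intro x hx
  simp

lemma pvA_score_as_sum (s : String) (words keywords : List String) :
    pvA_get_score s words keywords
      = (words.map (fun w => if PySem.Str.isIn w s then (PySem.Str.count s w : Int) * pvWt keywords w else 0)).sum := by
  unfold pvA_get_score
  have hfun : (fun (amount : Int) (word : String) =>
      if PySem.Str.isIn word s then
        if keywords.contains word then amount + (PySem.Str.count s word : Int) * 2
        else amount + (PySem.Str.count s word : Int)
      else amount)
    = fun amount word => amount +
        (if PySem.Str.isIn word s then (PySem.Str.count s word : Int) * pvWt keywords word else 0) := by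
    funext a w
    unfold pvWt
    split_ifs <;> ring
  rw [hfun, PySem.List.foldl_add, zero_add]

lemma pv_weights_items (words keywords : List String) :
    (pvB_weights words keywords).items
      = (PySem.Set.ofList words).map (fun w => (w, pvWt keywords w * (words.count w : Int))) := by
  have hkeys : (pvB_weights words keywords).keys = PySem.Set.ofList words := by
    unfold pvB_weights
    rw [PySem.Dict.keys_foldl_insert]
    rfl
  have hnodup : (pvB_weights words keywords).keys.Nodup := by
    rw [hkeys]; exact PySem.Set.nodup_ofList words
  rw [pv_items_eq_keys_map (pvB_weights words keywords) 0 hnodup, hkeys]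
  apply List.map_congr_left
  intro w hw
  have hget : (pvB_weights words keywords).getD w 0
      = (if (PySem.Set.ofList keywords).contains w then 2 else 1) * (words.count w : Int) := by
    unfold pvB_weights
    rw [pv_weights_getD (fun w => if (PySem.Set.ofList keywords).contains w then 2 else 1) words
      PySem.Dict.empty w]
    simp [PySem.Dict.getD_empty]
  rw [hget, pv_contains_ofList]
  rfl

lemma pv_score_eq (s : String) (words keywords : List String) :
    pvB_score (pvB_weights words keywords).items s = pvA_get_score s words keywords := by
  unfold pvB_score
  rw [pv_weights_items, List.filter_map, List.map_map,
    pv_filter_map_sum, pvA_score_as_sum]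
  conv_rhs => rw [pv_sum_dedup]
  congr 1
  apply List.map_congr_left
  intro w hw
  simp only [Function.comp]
  split_ifs <;> ring

lemma pv_update_eq (d : PySem.Dict Int (List String)) (k : Int) (v : String) :
    (if d.contains k then d.modify k [] (fun xs => xs ++ [v]) else d.insert k [v])
      = d.modify k [] (fun xs => xs ++ [v]) := by
  by_cases h : d.contains k
  · simp [h]
  · simp [h, PySem.Dict.modify, PySem.Dict.getD,
      (PySem.Dict.get?_eq_none_iff_contains d k).2 (by simpa using h)]

-- ===== VERDICT (by name: the statement is the Claim_ definition above) =====
theorem get_score_documents_spec : Claim_equal_get_score_documents := by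
  intro sentences words keywords _
  unfold Spec_get_score_documents get_score_documents get_score_documents_alt
  simp only [pv_score_eq, pv_update_eq]
  have hfold : (sentences.map (fun s => (pvA_get_score s words keywords, s))).foldl
        (fun d p => d.modify p.1 [] (fun xs => xs ++ [p.2])) PySem.Dict.empty
      = sentences.foldl (fun d sentence =>
          d.modify (pvA_get_score sentence words keywords) [] fun xs => xs ++ [sentence])
        PySem.Dict.empty := by
    rw [List.foldl_map]
  rw [← hfold]
  set L := sentences.map (fun s => (pvA_get_score s words keywords, s)) with hL
  set D := L.foldl (fun d p => d.modify p.1 [] (fun xs => xs ++ [p.2])) PySem.Dict.empty with hD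
  have hkeys : D.keys = PySem.Set.ofList (L.map (fun p => p.1)) := by
    rw [hD, PySem.Dict.keys_foldl_modify_key L (fun p => p.1) [] (fun _ p => fun xs => xs ++ [p.2])]
    rfl
  have hnodup : D.keys.Nodup := by
    rw [hkeys]; exact PySem.Set.nodup_ofList _
  rw [pv_items_eq_keys_map D [] hnodup, hkeys]
  simp only [PySem.List.dedup_eq_ofList]
  apply List.map_congr_left
  intro sc hsc
  rw [hD, PySem.Dict.getD_foldl_modify_append L PySem.Dict.empty sc]
  simp [PySem.Dict.getD_empty]
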